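-- pv_equiv track=rewrite | github.com/karanveersp/python-kata | kata/name_list.py | namelist
-- ===== SOURCE A (Python) =====
-- def namelist(names) -> str:
--     """
--     Given [{"name": "Bart"}, {"name": "Lisa"}, "name": "Maggie"}]
--     Returns "Bart, Lisa & Maggie"
--     """
--     try:
--         if len(names) == 1:
--             result = names[0]["name"]
--         else:
--             result = ", ".join([name["name"] for name in names[:-1]])
--             result += " & " + names[-1]["name"]
--     except:
--         result = ""
--     finally:
--         return result
-- ===== SOURCE B (Python) =====
-- def namelist(names) -> str:
--     """Same formatting as A: positional single pass (first bare, middles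
--     ', '-prefixed, last ' & '-prefixed) instead of join-init-plus-append-last."""
--     try:
--         vals = [n["name"] for n in names]
--         last = len(vals) - 1
--         parts = []
--         for i, v in enumerate(vals):
--             if i == 0:
--                 parts.append(v)
--             elif i == last:
--                 parts.append(" & " + v)
--             else:
--                 parts.append(", " + v)
--         result = "".join(parts)
--     except:
--         result = ""
--     return result
-- ===== Notes on version B (the rewrite author's own statement) =====
-- stated objective: alternative
-- what changed: B extracts all name values first, then builds the string in one positional enumerate pass (first element bare, middles ', '-prefixed, the last ' & '-prefixed) joined once, instead of A's ', '.join of the init followed by appending ' & ' + last element.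
import Mathlib
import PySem

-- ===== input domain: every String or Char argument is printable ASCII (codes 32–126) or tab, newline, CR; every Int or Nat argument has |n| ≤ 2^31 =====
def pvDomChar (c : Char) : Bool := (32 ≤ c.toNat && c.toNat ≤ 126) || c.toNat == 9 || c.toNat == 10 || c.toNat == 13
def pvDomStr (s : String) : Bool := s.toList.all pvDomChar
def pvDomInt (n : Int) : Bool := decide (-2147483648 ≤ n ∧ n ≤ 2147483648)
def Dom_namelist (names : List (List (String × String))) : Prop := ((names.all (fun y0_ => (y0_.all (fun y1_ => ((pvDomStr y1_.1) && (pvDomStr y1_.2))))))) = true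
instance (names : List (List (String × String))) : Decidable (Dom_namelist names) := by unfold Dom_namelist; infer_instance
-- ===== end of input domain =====

-- B rebuilds the string in one positional pass (first element bare, middles ', '-prefixed,
-- last ' & '-prefixed, joined once) instead of A's ', '.join of the init plus appended last;
-- like A, any failed 'name' lookup yields "" (A's bare except).

-- n["name"]: first-match lookup in the association list (the dict convention)
def nameOf (d : List (String × String)) : Option String := List.lookup "name" d

-- the comprehension [n["name"] for n in ns]: none if any lookup raises (KeyError)
def collectNames : List (List (String × String)) → Option (List String)
  | [] => some []
  | d :: ds => do
      let v ← nameOf d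
      let vs ← collectNames ds
      pure (v :: vs)

-- ===== PORT A =====
def namelist (names : List (List (String × String))) : String :=
  (if names.length = 1 then
      (PySem.List.pyGet? names 0).bind nameOf
   else do
      let pre ← collectNames (PySem.List.slice names none (some (-1)))
      let dl ← PySem.List.pyGet? names (-1)
      let lastName ← nameOf dl
      pure (PySem.Str.join ", " pre ++ " & " ++ lastName)).getD ""

-- ===== PORT B =====
def namelist_alt (names : List (List (String × String))) : String :=
  match collectNames names with
  | none => ""
  | some vals =>
      let lastIdx : Int := (vals.length : Int) - 1
      PySem.Str.join "" ((PySem.List.enumerate vals 0).foldl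
        (fun parts p =>
          parts ++ [if p.1 = 0 then p.2
                    else if p.1 = lastIdx then " & " ++ p.2
                    else ", " ++ p.2]) [])

-- ===== PRECONDITION & SPEC =====
def Spec_namelist (names : List (List (String × String))) (out : String) : Prop := out = namelist_alt names
instance (names : List (List (String × String))) (out : String) : Decidable (Spec_namelist names out) := by unfold Spec_namelist; infer_instance

-- ===== CLAIM (what is proved, stated in full; the proofs are below) =====
def Claim_equal_namelist : Prop := ∀ (names : List (List (String × String))), Dom_namelist names → Spec_namelist names (namelist names)

-- ===== LEMMAS AND PROOFS =====

def sAmp : List Char := " & ".toList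
def sComma : List Char := ", ".toList

-- the shape of B's tail pieces, at the char-list level
def glueC : List (List Char) → List Char
  | [] => []
  | [x] => sAmp ++ x
  | x :: y :: t => sComma ++ x ++ glueC (y :: t)

theorem glueC_cons_of_ne_nil (x : List Char) {l : List (List Char)} (h : l ≠ []) :
    glueC (x :: l) = sComma ++ x ++ glueC l := by
  cases l with
  | nil => exact absurd rfl h
  | cons y t => rfl

theorem foldl_push {α β : Type} (g : α → β) (l : List α) (acc : List β) :
    l.foldl (fun parts p => parts ++ [g p]) acc = acc ++ l.map g := by
  induction l generalizing acc with
  | nil => simp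
  | cons x t ih => simp [ih, List.append_assoc]

theorem join_nil_cons (p : List Char) (rest : List (List Char)) :
    PySem.Chars.join [] (p :: rest) = p ++ PySem.Chars.join [] rest := by
  cases rest with
  | nil => simp [PySem.Chars.join_singleton, PySem.Chars.join_nil]
  | cons q t => simp [PySem.Chars.join_cons_cons]

theorem mapped_enum (F : Int → List Char → List Char) :
    ∀ (xs : List String) (k : Int),
      (PySem.List.enumerate xs k).map (fun p => F p.1 p.2.toList) =
      (PySem.List.enumerate (xs.map String.toList) k).map (fun p => F p.1 p.2) := by
  intro xs
  induction xs with
  | nil => intro k; simp [PySem.List.enumerate_nil]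
  | cons x t ih => intro k; simp [PySem.List.enumerate_cons, ih]

-- B's positional pass over the tail equals glueC
theorem B3C : ∀ (rest : List (List Char)) (k m : Int), 1 ≤ k → m = k + rest.length - 1 →
    PySem.Chars.join []
      ((PySem.List.enumerate rest k).map
        (fun p => if p.1 = 0 then p.2 else if p.1 = m then sAmp ++ p.2 else sComma ++ p.2))
    = glueC rest := by
  intro rest
  induction rest with
  | nil => intro k m _ _; simp [PySem.List.enumerate_nil, PySem.Chars.join_nil, glueC]
  | cons x t ih =>
    intro k m hk hm
    rw [PySem.List.enumerate_cons]
    cases t with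
    | nil =>
      have hk0 : ¬ (k = 0) := by omega
      have hkm : k = m := by simp at hm; omega
      rw [PySem.List.enumerate_nil, List.map_cons, List.map_nil]
      rw [if_neg hk0, if_pos hkm, PySem.Chars.join_singleton]
      rfl
    | cons y t' =>
      have hk0 : ¬ (k = 0) := by omega
      have hkm : ¬ (k = m) := by simp at hm; omega
      rw [List.map_cons, join_nil_cons]
      have ih' := ih (k + 1) m (by omega) (by simp at hm ⊢; omega)
      rw [ih', if_neg hk0, if_neg hkm,
        glueC_cons_of_ne_nil x (show (y :: t') ≠ [] by simp)]

-- A's join-init-plus-last equals head ++ glueC of the tail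
theorem A3C : ∀ (t : List (List Char)) (v lv : List Char),
    PySem.Chars.join sComma (v :: t) ++ sAmp ++ lv = v ++ glueC (t ++ [lv]) := by
  intro t
  induction t with
  | nil =>
    intro v lv
    simp [PySem.Chars.join_singleton, glueC, List.append_assoc]
  | cons x t' ih =>
    intro v lv
    rw [PySem.Chars.join_cons_cons, List.cons_append]
    rw [glueC_cons_of_ne_nil x (show t' ++ [lv] ≠ [] by simp)]
    have h := ih x lv
    simp only [List.append_assoc] at h ⊢
    rw [h]

theorem collect_cons (d : List (String × String)) (ds : List (List (String × String))) :
    collectNames (d :: ds) =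
      (nameOf d).bind (fun v => (collectNames ds).map (fun vs => v :: vs)) := by
  cases h1 : nameOf d <;> cases h2 : collectNames ds <;>
    simp [collectNames, h1, h2]

theorem collect_concat (ds : List (List (String × String))) (d : List (String × String)) :
    collectNames (ds ++ [d]) =
      (collectNames ds).bind (fun vs => (nameOf d).map (fun v => vs ++ [v])) := by
  induction ds with
  | nil => cases h : nameOf d <;> simp [collectNames, h]
  | cons e es ih =>
    rw [List.cons_append, collect_cons, collect_cons, ih]
    cases nameOf e <;> cases collectNames es <;> cases nameOf d <;> try simp

theorem pyGet_singleton {α : Type} (d : α) : PySem.List.pyGet? [d] 0 = some d := by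
  simp [PySem.List.pyGet?, PySem.List.pyIdx?]

theorem pyGet_last {α : Type} (xs : List α) (x : α) :
    PySem.List.pyGet? (xs ++ [x]) (-1) = some x := by
  simp [PySem.List.pyGet?, PySem.List.pyIdx?]

-- B's value when every lookup succeeds, head pulled off
theorem namelist_alt_of_some {names : List (List (String × String))} {v : String}
    {rest : List String} (h : collectNames names = some (v :: rest)) :
    namelist_alt names = String.ofList (v.toList ++ glueC (rest.map String.toList)) := by
  rw [namelist_alt, h]
  simp only
  rw [foldl_push, List.nil_append]
  rw [← String.toList_inj]
  rw [PySem.Str.toList_join, String.toList_ofList]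
  rw [List.map_map]
  have hmap : (List.map (String.toList ∘ fun p =>
      if p.1 = 0 then p.2
      else if p.1 = (((v :: rest).length : Int) - 1) then " & " ++ p.2
      else ", " ++ p.2) (PySem.List.enumerate (v :: rest) 0)) =
      (List.map (fun p =>
        if p.1 = 0 then p.2
        else if p.1 = (((v :: rest).length : Int) - 1) then sAmp ++ p.2
        else sComma ++ p.2) (PySem.List.enumerate ((v :: rest).map String.toList) 0)) := by
    rw [← mapped_enum (fun i c =>
        if i = 0 then c
        else if i = (((v :: rest).length : Int) - 1) then sAmp ++ c
        else sComma ++ c)]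
    apply List.map_congr_left
    intro p _
    simp only [Function.comp_apply, apply_ite String.toList, String.toList_append]
    rfl
  rw [hmap]
  rw [List.map_cons, PySem.List.enumerate_cons, List.map_cons]
  rw [if_pos rfl, join_nil_cons]
  simp only [String.toList_ofList]
  congr 1
  have h01 : (0 : Int) + 1 = 1 := by norm_num
  rw [h01]
  exact B3C _ 1 _ (le_refl 1)
    (by simp only [List.length_cons, List.length_map]; push_cast; omega)

-- ===== VERDICT (by name: the statement is the Claim_ definition above) =====
theorem namelist_spec : Claim_equal_namelist := by
  intro names _
  unfold Spec_namelist
  rcases List.eq_nil_or_concat names with hnil | ⟨ds, dl, rfl⟩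
  · subst hnil
    simp [namelist, namelist_alt, collectNames, PySem.List.pyGet?, PySem.List.pyIdx?,
      PySem.List.slice_to_neg_one]
    rw [← String.toList_inj]
    simp [PySem.Str.toList_join, PySem.Chars.join_nil]
  · simp only [List.concat_eq_append]
    cases ds with
    | nil =>
      simp only [List.nil_append]
      rw [namelist]
      rw [if_pos (by simp)]
      rw [pyGet_singleton]
      cases h : nameOf dl with
      | none =>
        have hc : collectNames [dl] = none := by rw [collect_cons, h]; rfl
        simp [namelist_alt, hc, h]
      | some v =>
        have hc : collectNames [dl] = some [v] := by rw [collect_cons, h, collectNames]; rfl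
        simp only [Option.bind]
        rw [h, namelist_alt_of_some hc]
        rw [← String.toList_inj]
        simp [glueC]
    | cons e es =>
      rw [namelist]
      rw [if_neg (by simp)]
      rw [PySem.List.slice_to_neg_one, List.dropLast_concat, pyGet_last]
      simp only [List.cons_append]
      cases hds : collectNames (e :: es) with
      | none =>
        have hc : collectNames (e :: (es ++ [dl])) = none := by
          rw [← List.cons_append, collect_concat, hds]; rfl
        simp [namelist_alt, hc]
      | some pvs =>
        cases hl : nameOf dl with
        | none =>
          have hc : collectNames (e :: (es ++ [dl])) = none := by
            rw [← List.cons_append, collect_concat, hds, hl]; rfl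
          simp [namelist_alt, hc, hl]
        | some lv =>
          have hshape : ∃ pv pvt, pvs = pv :: pvt := by
            rw [collect_cons] at hds
            cases h1 : nameOf e with
            | none => rw [h1] at hds; simp at hds
            | some v1 =>
              rw [h1] at hds
              cases h2 : collectNames es with
              | none => rw [h2] at hds; simp at hds
              | some vs => rw [h2] at hds; simp at hds; exact ⟨v1, vs, hds.symm⟩
          obtain ⟨pv, pvt, rfl⟩ := hshape
          have hc : collectNames (e :: (es ++ [dl])) = some (pv :: (pvt ++ [lv])) := by
            rw [← List.cons_append, collect_concat, hds, hl]; rfl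
          rw [namelist_alt_of_some hc]
          change ((nameOf dl).bind fun lastName =>
              some (PySem.Str.join ", " (pv :: pvt) ++ " & " ++ lastName)).getD "" =
            String.ofList (pv.toList ++ glueC ((pvt ++ [lv]).map String.toList))
          rw [hl]
          change PySem.Str.join ", " (pv :: pvt) ++ " & " ++ lv =
            String.ofList (pv.toList ++ glueC ((pvt ++ [lv]).map String.toList))
          rw [← String.toList_inj]
          rw [String.toList_ofList, String.toList_append, String.toList_append,
            PySem.Str.toList_join]
          have hA : (" & " : String).toList = sAmp := rfl
          rw [hA]
          have hCm : (", " : String).toList = sComma := rfl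
          rw [hCm]
          rw [List.map_cons]
          rw [A3C]
          simp
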